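-- pv_equiv track=rewrite | github.com/tsangel/dicomsdl | misc/charset/build_tables.py | generate_ccode_map_singlebyte_to_unicode
-- ===== SOURCE A (Python) =====
-- FORMAT16 = """
-- static const uint16_t {name}[{size}] = {{
-- {code}
-- }};"""
--
-- class CCodeBuilder(object):
--     def __init__(self, indent=4, margin=80):
--         self.rows = []
--         self.row = []
--         self.indent = ' '*indent
--         self.margin = margin
--         self.nitems = 0
--
--     def addRow(self, s):
--         # add a row (such as comment)
--         # ex) stmt.append("// page %d"%(pageno))
--         self.flush()
--         self.rows.append(s)
--
--     def addItem(self, s):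
--         # add an item to current row
--         # ex) stmt.addItem('%d,'%(number))
--         tmp = ''.join(self.row)
--         if len(self.indent + tmp + s) > self.margin:
--             self.flush()
--         self.row.append(s)
--         self.nitems += 1
--
--     def flush(self):
--         # append all items in row to rows,
--         # then empty row.
--         if self.row:
--             lastline = ''.join(self.row)
--             self.rows.append(lastline)
--             self.row = []
--
--     def joinRows(self):
--         # retuen all rows in one string
--         self.flush()
--         # remove trailing comma
--         self.rows[-1] = self.rows[-1].rstrip()[:-1]
--         return '\n'.join(
--             self.indent + r for r in self.rows)
--
--     def numberOfItems(self):
--         return self.nitems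
--
-- def generate_ccode_map_singlebyte_to_unicode(m2u, codecname, area):
--     """ Generate table for converting Single Byte Character Sets
--     to unicode.
--
--     0 for mapped unicode -> control characters or delimiters
--     U+FFFD -> illegal character
--     """
--
--     # part05. 6.1.3 Control Characters
--     # Table 6.1-1. DICOM Control Characters and Their Encoding
--     # LF \x0a, FF \x0c, CR \x0d, ESC \x1b, TAB \x09
--
--     if area == 'g0':
--         for i in range(0, 0x21):
--             m2u[i] = 0
--         m2u[ord(b'\\')] = 0  # delimiters
--         m2u[ord(b'=')] = 0
--         m2u[ord(b'^')] = 0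
--         m2u[0x7f] = 0  # control character DEL
--
--     result = ['\n// %s (%s set)'%(codecname.upper(), area.upper())]
--
--     code = CCodeBuilder()
--     varname = 'map_%s_to_unicode_%s'%(
--         codecname.lower(), area.lower())
--
--     char_range = range(0, 0x80) if area == 'g0' else range(0x80, 0x100)
--     charsets = [m2u[c] for c in char_range if c in m2u]
--
--     if len([m2u[c] for c in char_range if c in m2u]) != 128:
--         fmt = '%-8s'
--     else:
--         m = max(charsets)
--         if m >= 0x1000:
--             fmt = '%-8s'
--         elif m >= 0x100:
--             fmt = '%-7s'
--         else:
--             fmt = '%-6s'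
--
--     for c in char_range:
--         if c in m2u:
--             item = '0x%x,'%m2u[c]
--         else:
--             item = '0xfffd,'
--         code.addItem(fmt%(item))
--         if c % 8 == 7:
--             code.flush()
--
--     result.append(FORMAT16.format(name=varname, size=code.numberOfItems(),
--                             code=code.joinRows()))
--
--     return ''.join(result)
-- ===== SOURCE B (Python) =====
-- FORMAT16 = """
-- static const uint16_t {name}[{size}] = {{
-- {code}
-- }};"""
--
--
-- def _wrap(items):
--     # Line breaks are computed from the item LENGTHS alone: each line takes
--     # the longest prefix of the remaining items whose total length fits in
--     # 80 - 4 (indent) columns (the first item of a line is always taken);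
--     # the line text is then formed by joining that slice.
--     lines = []
--     while items:
--         budget = 76 - len(items[0])
--         k = 1
--         while k < len(items) and len(items[k]) <= budget:
--             budget -= len(items[k])
--             k += 1
--         lines.append(''.join(items[:k]))
--         items = items[k:]
--     return lines
--
--
-- def generate_ccode_map_singlebyte_to_unicode(m2u, codecname, area):
--     """Generate table for converting Single Byte Character Sets to unicode.
--
--     Same mapping as the original; the table text is produced by computing
--     line-break positions from item lengths and slicing, instead of a
--     stateful string-accumulating code builder.
--     (Mutates m2u for the 'g0' area exactly like the original.)
--     """
--     if area == 'g0':
--         for i in range(0, 0x21):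
--             m2u[i] = 0
--         for d in (0x5c, 0x3d, 0x5e, 0x7f):  # '\\', '=', '^', DEL
--             m2u[d] = 0
--
--     char_range = range(0, 0x80) if area == 'g0' else range(0x80, 0x100)
--     charsets = [m2u[c] for c in char_range if c in m2u]
--
--     if len(charsets) != 128 or max(charsets) >= 0x1000:
--         width = 8
--     else:
--         width = 6 + (max(charsets) >= 0x100)
--
--     items = [('0x%x,' % m2u[c] if c in m2u else '0xfffd,').ljust(width)
--              for c in char_range]
--
--     # the builder is flushed after every 8th table entry, so each block of 8
--     # items wraps independently
--     lines = []
--     for i in range(0, 128, 8):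
--         lines += _wrap(items[i:i + 8])
--     lines[-1] = lines[-1].rstrip()[:-1]
--     code = '\n'.join('    ' + l for l in lines)
--
--     varname = 'map_%s_to_unicode_%s' % (codecname.lower(), area.lower())
--     return '\n// %s (%s set)' % (codecname.upper(), area.upper()) + \
--         FORMAT16.format(name=varname, size=128, code=code)
-- ===== Notes on version B (the rewrite author's own statement) =====
-- stated objective: simpler
-- what changed: B drops the stateful CCodeBuilder entirely: line breaks are computed arithmetically from the item LENGTHS (longest prefix of each 8-item block whose total fits 76 columns), lines are then formed by slicing and joining the precomputed item list, the trailing comma is stripped off the last line, and the width cascade becomes the arithmetic 6 + (m>=0x100) with an 8 override; size is the constant 128.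
import Mathlib
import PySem

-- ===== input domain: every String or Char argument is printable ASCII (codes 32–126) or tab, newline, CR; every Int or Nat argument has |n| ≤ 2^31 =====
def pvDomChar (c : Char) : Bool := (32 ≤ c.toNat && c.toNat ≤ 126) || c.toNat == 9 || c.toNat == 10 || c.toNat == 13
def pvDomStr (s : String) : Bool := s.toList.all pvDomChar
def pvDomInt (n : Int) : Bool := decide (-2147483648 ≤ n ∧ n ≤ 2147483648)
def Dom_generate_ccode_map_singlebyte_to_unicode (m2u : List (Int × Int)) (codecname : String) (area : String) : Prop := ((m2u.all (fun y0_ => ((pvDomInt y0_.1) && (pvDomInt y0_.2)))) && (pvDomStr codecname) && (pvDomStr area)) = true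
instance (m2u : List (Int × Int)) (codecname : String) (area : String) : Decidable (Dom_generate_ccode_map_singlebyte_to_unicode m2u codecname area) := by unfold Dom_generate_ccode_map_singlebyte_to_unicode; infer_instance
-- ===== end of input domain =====

-- B replaces the stateful CCodeBuilder with line-break positions computed arithmetically from the
-- item lengths, lines then formed by slicing and joining a precomputed item list (objective:
-- simpler decomposition, same cost). Both versions mutate the m2u dict in the same way for area
-- 'g0'; the equivalence proved here is about the return value.

-- ===== PORT A =====

-- Python "'0x%x,' % v": '%x' is lowercase hex of |v| with '-' in front for negatives
-- (hand-ported via Nat.toDigits 16, which is exact for this).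
def pyHexFmt (n : Int) : String :=
  if n < 0 then "-" ++ String.ofList (Nat.toDigits 16 n.natAbs)
  else String.ofList (Nat.toDigits 16 n.toNat)

-- Python "'%-ws' % s" (= s.ljust(w)): pad s with spaces on the right to width w (hand-ported, exact).
def pyLjust (s : String) (w : Int) : String :=
  s ++ String.ofList (List.replicate (w - PySem.Str.len s).toNat ' ')

structure CCodeBuilder where
  rows : List String
  row : List String
  indent : String
  margin : Int
  nitems : Int
deriving Repr, DecidableEq

-- CCodeBuilder(indent=4, margin=80)
def CCodeBuilder.init : CCodeBuilder := ⟨[], [], "    ", 80, 0⟩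

def CCodeBuilder.flush (b : CCodeBuilder) : CCodeBuilder :=
  if b.row ≠ [] then { b with rows := b.rows ++ [PySem.Str.join "" b.row], row := [] } else b

def CCodeBuilder.addItem (b : CCodeBuilder) (s : String) : CCodeBuilder :=
  let tmp := PySem.Str.join "" b.row
  let b' := if PySem.Str.len (b.indent ++ tmp ++ s) > b.margin then b.flush else b
  { b' with row := b'.row ++ [s], nitems := b'.nitems + 1 }

-- self.rows[-1] = self.rows[-1].rstrip()[:-1]; rows is nonempty at every call site
-- (128 items were added), so the pyGetD default is never read.
def CCodeBuilder.joinRows (b : CCodeBuilder) : String :=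
  let b' := b.flush
  let rows := PySem.List.pySetD b'.rows (-1)
      (PySem.Str.slice (PySem.Str.rstrip (PySem.List.pyGetD b'.rows (-1) "")) none (some (-1)))
  PySem.Str.join "\n" (rows.map (fun r => b'.indent ++ r))

-- the loop body "code.addItem(fmt%(item)); if c % 8 == 7: code.flush()"
def buildStep (d : PySem.Dict Int Int) (fmt : Int) (code : CCodeBuilder) (c : Int) : CCodeBuilder :=
  let item := match d.get? c with
    | some v => "0x" ++ pyHexFmt v ++ ","
    | none => "0xfffd,"
  let code := code.addItem (pyLjust item fmt)
  if PySem.Int.mod c 8 == 7 then code.flush else code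

def generate_ccode_map_singlebyte_to_unicode (m2u : List (Int × Int)) (codecname : String) (area : String) : String :=
  let d : PySem.Dict Int Int := PySem.Dict.mk m2u
  let d := if area == "g0" then
      -- for i in range(0, 0x21): m2u[i] = 0 ; then '\\' (92), '=' (61), '^' (94), DEL (0x7f)
      let d := (PySem.List.pyRange 0 0x21).foldl (fun d i => d.insert i 0) d
      (((d.insert 92 0).insert 61 0).insert 94 0).insert 127 0
    else d
  let result := ["\n// " ++ PySem.Str.upper codecname ++ " (" ++ PySem.Str.upper area ++ " set)"]
  let code := CCodeBuilder.init
  let varname := "map_" ++ PySem.Str.lower codecname ++ "_to_unicode_" ++ PySem.Str.lower area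
  let char_range := if area == "g0" then PySem.List.pyRange 0 0x80 else PySem.List.pyRange 0x80 0x100
  let charsets := char_range.filterMap (fun c => d.get? c)
  -- fmt ported as the pad width of '%-8s' / '%-7s' / '%-6s'; max(charsets) is only taken in the
  -- branch where charsets has 128 elements, so the getD default is never read
  let fmt : Int :=
    if PySem.List.len (char_range.filterMap (fun c => d.get? c)) ≠ 128 then 8
    else
      let m := (PySem.List.max? charsets (fun v => v)).getD 0
      if m ≥ 0x1000 then 8 else if m ≥ 0x100 then 7 else 6
  let code := char_range.foldl (buildStep d fmt) code
  let result := result ++ ["\nstatic const uint16_t " ++ varname ++ "[" ++ PySem.Int.toStr code.nitems ++ "] = {\n" ++ code.joinRows ++ "\n};"]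
  PySem.Str.join "" result

-- ===== PORT B =====

-- inner "while k < len(items) and len(items[k]) <= budget" counter of B's _wrap: how many
-- further items fit in the remaining budget (Python counts with k starting at 1; this is k-1)
def lineCount (budget : Int) : List String → Nat
  | [] => 0
  | it :: rest =>
    if PySem.Str.len it ≤ budget then lineCount (budget - PySem.Str.len it) rest + 1 else 0

-- B's _wrap: line breaks computed from item lengths, lines formed by slicing and joining
def wrapB : List String → List String
  | [] => []
  | h :: t =>
    let k := lineCount (76 - PySem.Str.len h) t
    PySem.Str.join "" (h :: t.take k) :: wrapB (t.drop k)
termination_by l => l.length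
decreasing_by simp [List.length_drop]

def generate_ccode_map_singlebyte_to_unicode_alt (m2u : List (Int × Int)) (codecname : String) (area : String) : String :=
  let d : PySem.Dict Int Int := PySem.Dict.mk m2u
  let d := if area == "g0" then
      let d := (PySem.List.pyRange 0 0x21).foldl (fun d i => d.insert i 0) d
      ([92, 61, 94, 127] : List Int).foldl (fun d i => d.insert i 0) d
    else d
  let char_range := if area == "g0" then PySem.List.pyRange 0 0x80 else PySem.List.pyRange 0x80 0x100
  let charsets := char_range.filterMap (fun c => d.get? c)
  -- width: max(charsets) is only taken when charsets has 128 elements, so getD's default is never read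
  let width : Int :=
    if PySem.List.len charsets ≠ 128 ∨ (PySem.List.max? charsets (fun v => v)).getD 0 ≥ 0x1000 then 8
    else 6 + (if (PySem.List.max? charsets (fun v => v)).getD 0 ≥ 0x100 then 1 else 0)
  let items := char_range.map (fun c =>
      pyLjust (match d.get? c with
        | some v => "0x" ++ pyHexFmt v ++ ","
        | none => "0xfffd,") width)
  let lines := (PySem.List.pyRange 0 128 8).foldl (fun lines i =>
      lines ++ wrapB (PySem.List.slice items (some i) (some (i + 8)))) []
  -- lines[-1] = lines[-1].rstrip()[:-1]; lines is nonempty (every 8-item block yields a line)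
  let lines := PySem.List.pySetD lines (-1)
      (PySem.Str.slice (PySem.Str.rstrip (PySem.List.pyGetD lines (-1) "")) none (some (-1)))
  let code := PySem.Str.join "\n" (lines.map (fun l => "    " ++ l))
  let varname := "map_" ++ PySem.Str.lower codecname ++ "_to_unicode_" ++ PySem.Str.lower area
  "\n// " ++ PySem.Str.upper codecname ++ " (" ++ PySem.Str.upper area ++ " set)" ++
    ("\nstatic const uint16_t " ++ varname ++ "[" ++ PySem.Int.toStr 128 ++ "] = {\n" ++ code ++ "\n};")

-- ===== PRECONDITION & SPEC =====
def Spec_generate_ccode_map_singlebyte_to_unicode (m2u : List (Int × Int)) (codecname : String) (area : String) (out : String) : Prop := out = generate_ccode_map_singlebyte_to_unicode_alt m2u codecname area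
instance (m2u : List (Int × Int)) (codecname : String) (area : String) (out : String) : Decidable (Spec_generate_ccode_map_singlebyte_to_unicode m2u codecname area out) := by unfold Spec_generate_ccode_map_singlebyte_to_unicode; infer_instance

-- ===== CLAIM (what is proved, stated in full; the proofs are below) =====
def Claim_equal_generate_ccode_map_singlebyte_to_unicode : Prop := ∀ (m2u : List (Int × Int)) (codecname : String) (area : String), Dom_generate_ccode_map_singlebyte_to_unicode m2u codecname area → Spec_generate_ccode_map_singlebyte_to_unicode m2u codecname area (generate_ccode_map_singlebyte_to_unicode m2u codecname area)

-- ===== LEMMAS AND PROOFS =====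

theorem chars_join_append_one (xs : List (List Char)) (t : List Char) :
    PySem.Chars.join [] (xs ++ [t]) = PySem.Chars.join [] xs ++ t := by
  induction xs with
  | nil => simp [PySem.Chars.join_nil, PySem.Chars.join_singleton]
  | cons h l ih =>
    cases l with
    | nil => simp [PySem.Chars.join_singleton, PySem.Chars.join_cons_cons]
    | cons h2 l2 => simp_all [PySem.Chars.join_cons_cons]

theorem strjoin_nil : PySem.Str.join "" ([] : List String) = "" := by
  simp [PySem.Str.join, PySem.Chars.join_nil]

theorem strjoin_one (t : String) : PySem.Str.join "" [t] = t := by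
  simp [PySem.Str.join]

theorem strjoin_append_one (xs : List String) (t : String) :
    PySem.Str.join "" (xs ++ [t]) = PySem.Str.join "" xs ++ t := by
  simp [PySem.Str.join, chars_join_append_one, String.ofList_append]

theorem strjoin_two (x y : String) : PySem.Str.join "" [x, y] = x ++ y := by
  rw [show [x, y] = [x] ++ [y] from rfl, strjoin_append_one, strjoin_one]

theorem strjoin_cons (x : String) (xs : List String) :
    PySem.Str.join "" (x :: xs) = x ++ PySem.Str.join "" xs := by
  cases xs with
  | nil => rw [strjoin_one, strjoin_nil]; simp
  | cons y ys =>
    simp [PySem.Str.join, PySem.Chars.join_cons_cons, String.ofList_append]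

theorem len_indent : PySem.Str.len "    " = 4 := by
  simp [PySem.Str.len_eq]

theorem addItem_nil (rows : List String) (n : Int) (s : String) :
    (CCodeBuilder.mk rows [] "    " 80 n).addItem s = ⟨rows, [s], "    ", 80, n + 1⟩ := by
  simp [CCodeBuilder.addItem, CCodeBuilder.flush]

theorem addItem_pos (rows row : List String) (n : Int) (s : String) (hrow : row ≠ [])
    (h : 4 + PySem.Str.len (PySem.Str.join "" row) + PySem.Str.len s > 80) :
    (CCodeBuilder.mk rows row "    " 80 n).addItem s
      = ⟨rows ++ [PySem.Str.join "" row], [s], "    ", 80, n + 1⟩ := by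
  simp only [CCodeBuilder.addItem, CCodeBuilder.flush]
  rw [if_pos (by simp only [PySem.Str.len_append, len_indent]; omega)]
  simp [hrow]

theorem addItem_neg (rows row : List String) (n : Int) (s : String)
    (h : ¬ 4 + PySem.Str.len (PySem.Str.join "" row) + PySem.Str.len s > 80) :
    (CCodeBuilder.mk rows row "    " 80 n).addItem s
      = ⟨rows, row ++ [s], "    ", 80, n + 1⟩ := by
  simp only [CCodeBuilder.addItem]
  rw [if_neg (by simp only [PySem.Str.len_append, len_indent]; omega)]

theorem wrapB_nil : wrapB [] = [] := by
  rw [wrapB.eq_def]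

theorem wrapB_cons_eq (h : String) (t : List String) :
    wrapB (h :: t)
      = PySem.Str.join "" (h :: t.take (lineCount (76 - PySem.Str.len h) t))
          :: wrapB (t.drop (lineCount (76 - PySem.Str.len h) t)) := by
  rw [wrapB.eq_def]

-- A's greedy builder state, expressed as the continuation "current line cur, remaining budget":
-- proof-side recursion that both A's fold and B's slicing are shown equal to
def wrapCont (budget : Int) (cur : String) : List String → List String
  | [] => [cur]
  | it :: rest =>
    if PySem.Str.len it ≤ budget then wrapCont (budget - PySem.Str.len it) (cur ++ it) rest
    else cur :: wrapCont (76 - PySem.Str.len it) it rest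

theorem inner_wrap (ts : List String) : ∀ (rows row : List String) (n : Int), row ≠ [] →
    (List.foldl CCodeBuilder.addItem ⟨rows, row, "    ", 80, n⟩ ts).flush
      = ⟨rows ++ wrapCont (76 - PySem.Str.len (PySem.Str.join "" row)) (PySem.Str.join "" row) ts,
          [], "    ", 80, n + ts.length⟩ := by
  induction ts with
  | nil =>
    intro rows row n hrow
    simp [CCodeBuilder.flush, wrapCont, hrow]
  | cons t ts ih =>
    intro rows row n hrow
    simp only [List.foldl_cons, List.length_cons]
    by_cases hc : 4 + PySem.Str.len (PySem.Str.join "" row) + PySem.Str.len t > 80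
    · rw [addItem_pos rows row n t hrow hc, ih _ [t] _ (by simp)]
      simp only [wrapCont, if_neg (show ¬ PySem.Str.len t ≤ 76 - PySem.Str.len (PySem.Str.join "" row) by omega),
        strjoin_one]
      simp only [CCodeBuilder.mk.injEq, true_and]
      refine ⟨by simp, by push_cast; ring⟩
    · rw [addItem_neg rows row n t hc, ih _ (row ++ [t]) _ (by simp)]
      simp only [wrapCont, if_pos (show PySem.Str.len t ≤ 76 - PySem.Str.len (PySem.Str.join "" row) by omega),
        strjoin_append_one, PySem.Str.len_append]
      simp only [CCodeBuilder.mk.injEq, true_and]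
      refine ⟨by rw [sub_add_eq_sub_sub], by push_cast; ring⟩

theorem wrapCont_eq (ts : List String) : ∀ (budget : Int) (cur : String),
    wrapCont budget cur ts
      = (cur ++ PySem.Str.join "" (ts.take (lineCount budget ts)))
          :: wrapB (ts.drop (lineCount budget ts)) := by
  induction ts with
  | nil => intro b c; simp [wrapCont, lineCount, wrapB_nil, strjoin_nil]
  | cons it rest ih =>
    intro b c
    by_cases h : PySem.Str.len it ≤ b
    · simp only [wrapCont, lineCount, if_pos h]
      rw [ih]
      simp [List.take_succ_cons, List.drop_succ_cons, strjoin_cons, String.append_assoc]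
    · simp only [wrapCont, lineCount, if_neg h]
      rw [ih]
      simp only [List.take_zero, List.drop_zero, strjoin_nil]
      rw [wrapB_cons_eq]
      simp [strjoin_cons]

theorem wrapB_cons (h : String) (t : List String) :
    wrapB (h :: t) = wrapCont (76 - PySem.Str.len h) h t := by
  rw [wrapCont_eq, wrapB_cons_eq]
  simp [strjoin_cons]

-- the per-item step of A's table loop, abstracted over the item text
def genStep (g : Int → String) (code : CCodeBuilder) (c : Int) : CCodeBuilder :=
  if PySem.Int.mod c 8 == 7 then (code.addItem (g c)).flush else code.addItem (g c)

-- the per-item text shared by the two table loops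
def gItem (d : PySem.Dict Int Int) (w : Int) (c : Int) : String :=
  pyLjust (match d.get? c with
    | some v => "0x" ++ pyHexFmt v ++ ","
    | none => "0xfffd,") w

theorem foldl4_insert (d0 : PySem.Dict Int Int) :
    ([92, 61, 94, 127] : List Int).foldl (fun d i => d.insert i 0) d0
      = (((d0.insert 92 0).insert 61 0).insert 94 0).insert 127 0 := rfl

theorem buildStep_eq (d : PySem.Dict Int Int) (w : Int) :
    buildStep d w = genStep (gItem d w) := by
  funext code c
  simp [buildStep, genStep, gItem]

-- A's width cascade equals B's arithmetic form
theorem widthEq (n m : Int) :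
    (if n ≠ 128 then (8 : Int) else if m ≥ 0x1000 then 8 else if m ≥ 0x100 then 7 else 6)
      = (if n ≠ 128 ∨ m ≥ 0x1000 then 8 else 6 + (if m ≥ 0x100 then (1 : Int) else 0)) := by
  split_ifs <;> omega

-- k chunks of 8 starting at offset i from base a, accumulated through B's row wrapper
def procAcc (g : Int → String) (a : Int) : Nat → Int → List String → List String
  | 0, _, acc => acc
  | Nat.succ k, i, acc =>
    procAcc g a k (i + 8) (acc ++ wrapB ((PySem.List.pyRange (a + i) (a + i + 8)).map g))

theorem lemA (g : Int → String) (a : Int) (ha : a % 8 = 0) :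
    ∀ (k : Nat) (i : Int), i % 8 = 0 → ∀ (rows : List String) (n : Int),
    List.foldl (genStep g) ⟨rows, [], "    ", 80, n⟩
        (PySem.List.pyRange (a + i) (a + i + 8 * k))
      = ⟨procAcc g a k i rows, [], "    ", 80, n + 8 * k⟩ := by
  intro k
  induction k with
  | zero =>
    intro i hi rows n
    rw [PySem.List.pyRange_one_eq_nil (by push_cast; omega)]
    simp only [List.foldl_nil, procAcc]
    simp only [CCodeBuilder.mk.injEq, true_and]
    push_cast
    ring
  | succ k ih =>
    intro i hi rows n
    push_cast
    rw [PySem.List.pyRange_one_append (a + i) (a + i + 8) (a + i + 8 * ((k : Int) + 1))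
      (by omega) (by omega), List.foldl_append]
    have h8 : PySem.List.pyRange (a + i) (a + i + 8)
        = [a + i, a + i + 1, a + i + 2, a + i + 3, a + i + 4, a + i + 5, a + i + 6, a + i + 7] := by
      rw [PySem.List.pyRange_one_cons (by omega), PySem.List.pyRange_one_cons (by omega),
        PySem.List.pyRange_one_cons (by omega), PySem.List.pyRange_one_cons (by omega),
        PySem.List.pyRange_one_cons (by omega), PySem.List.pyRange_one_cons (by omega),
        PySem.List.pyRange_one_cons (by omega), PySem.List.pyRange_one_cons (by omega),
        PySem.List.pyRange_one_eq_nil (by omega)]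
      norm_num
      all_goals omega
    have hm : ∀ v : Int, 0 ≤ v → v < 8 → PySem.Int.mod (a + i + v) 8 = v := by
      intro v h0 h8'
      rw [PySem.Int.mod_eq_emod_of_pos (by norm_num)]
      omega
    rw [h8]
    simp only [List.foldl_cons, List.foldl_nil, genStep]
    rw [show PySem.Int.mod (a + i) 8 = 0 by
        have := hm 0 (by omega) (by omega); simpa using this,
      hm 1 (by omega) (by omega), hm 2 (by omega) (by omega), hm 3 (by omega) (by omega),
      hm 4 (by omega) (by omega), hm 5 (by omega) (by omega), hm 6 (by omega) (by omega),
      hm 7 (by omega) (by omega)]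
    simp only [show ((0 : Int) == 7) = false from rfl, show ((1 : Int) == 7) = false from rfl,
      show ((2 : Int) == 7) = false from rfl, show ((3 : Int) == 7) = false from rfl,
      show ((4 : Int) == 7) = false from rfl, show ((5 : Int) == 7) = false from rfl,
      show ((6 : Int) == 7) = false from rfl, show ((7 : Int) == 7) = true from rfl,
      Bool.false_eq_true, if_false, if_true]
    rw [addItem_nil]
    have h := inner_wrap [g (a + i + 1), g (a + i + 2), g (a + i + 3), g (a + i + 4),
      g (a + i + 5), g (a + i + 6), g (a + i + 7)] rows [g (a + i)] (n + 1) (by simp)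
    simp only [List.foldl_cons, List.foldl_nil, List.length_cons, List.length_nil,
      strjoin_one] at h
    rw [h]
    have hih := ih (i + 8) (by omega)
    rw [show a + (i + 8) = a + i + 8 from by ring] at hih
    rw [show a + i + 8 + 8 * (k : Int) = a + i + 8 * ((k : Int) + 1) from by ring] at hih
    rw [hih]
    simp only [procAcc, h8, List.map_cons, List.map_nil, wrapB_cons]

    simp only [CCodeBuilder.mk.injEq, true_and]
    push_cast
    ring

theorem sliceMap (g : Int → String) (a i : Int) (h0 : 0 ≤ i) (h1 : i + 8 ≤ 128) :
    PySem.List.slice ((PySem.List.pyRange a (a + 128)).map g) (some i) (some (i + 8))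
      = (PySem.List.pyRange (a + i) (a + i + 8)).map g := by
  rw [PySem.List.pyRange_one_append a (a + i) (a + 128) (by omega) (by omega),
    PySem.List.pyRange_one_append (a + i) (a + i + 8) (a + 128) (by omega) (by omega)]
  rw [PySem.List.slice_toNat _ h0 (by omega)]
  simp only [List.map_append]
  rw [List.drop_left' (by simp [PySem.List.length_pyRange_one]; try omega),
    List.take_left' (by simp [PySem.List.length_pyRange_one]; try omega)]

theorem lemB (g : Int → String) (a : Int) :
    (PySem.List.pyRange 0 128 8).foldl (fun lines i =>
        lines ++ wrapB (PySem.List.slice ((PySem.List.pyRange a (a + 128)).map g)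
          (some i) (some (i + 8)))) []
      = procAcc g a 16 0 [] := by
  rw [show PySem.List.pyRange 0 128 8
      = [0, 8, 16, 24, 32, 40, 48, 56, 64, 72, 80, 88, 96, 104, 112, 120] from by decide]
  simp only [List.foldl_cons, List.foldl_nil]
  rw [sliceMap g a 0 (by omega) (by omega), sliceMap g a 8 (by omega) (by omega),
    sliceMap g a 16 (by omega) (by omega), sliceMap g a 24 (by omega) (by omega),
    sliceMap g a 32 (by omega) (by omega), sliceMap g a 40 (by omega) (by omega),
    sliceMap g a 48 (by omega) (by omega), sliceMap g a 56 (by omega) (by omega),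
    sliceMap g a 64 (by omega) (by omega), sliceMap g a 72 (by omega) (by omega),
    sliceMap g a 80 (by omega) (by omega), sliceMap g a 88 (by omega) (by omega),
    sliceMap g a 96 (by omega) (by omega), sliceMap g a 104 (by omega) (by omega),
    sliceMap g a 112 (by omega) (by omega), sliceMap g a 120 (by omega) (by omega)]
  simp only [procAcc]
  norm_num

set_option maxHeartbeats 1000000 in
theorem main_eq (d : PySem.Dict Int Int) (wA wB : Int) (hw : wA = wB)
    (hdr varname : String) (a b : Int) (hb : b = a + 128) (ha : a % 8 = 0) :
    PySem.Str.join "" [hdr,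
      "\nstatic const uint16_t " ++ varname ++ "[" ++
        PySem.Int.toStr (List.foldl (genStep (gItem d wA)) CCodeBuilder.init
          (PySem.List.pyRange a b)).nitems ++
        "] = {\n" ++ (List.foldl (genStep (gItem d wA)) CCodeBuilder.init
          (PySem.List.pyRange a b)).joinRows ++ "\n};"]
    = hdr ++ ("\nstatic const uint16_t " ++ varname ++ "[" ++ PySem.Int.toStr 128 ++ "] = {\n" ++
        PySem.Str.join "\n" ((PySem.List.pySetD ((PySem.List.pyRange 0 128 8).foldl (fun lines i =>
            lines ++ wrapB (PySem.List.slice ((PySem.List.pyRange a b).map (gItem d wB))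
              (some i) (some (i + 8)))) []) (-1)
          (PySem.Str.slice (PySem.Str.rstrip (PySem.List.pyGetD
            ((PySem.List.pyRange 0 128 8).foldl (fun lines i =>
              lines ++ wrapB (PySem.List.slice ((PySem.List.pyRange a b).map (gItem d wB))
                (some i) (some (i + 8)))) []) (-1) "")) none (some (-1)))).map
          (fun l => "    " ++ l)) ++ "\n};") := by
  subst hw hb
  have hA := lemA (gItem d wA) a ha 16 0 (by omega) [] 0
  norm_num at hA
  simp only [CCodeBuilder.init]
  rw [hA, lemB (gItem d wA) a]
  simp only [CCodeBuilder.joinRows, CCodeBuilder.flush, ne_eq, not_true_eq_false, if_false,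
    strjoin_two]

-- ===== VERDICT (by name: the statement is the Claim_ definition above) =====
set_option maxHeartbeats 2000000 in
theorem generate_ccode_map_singlebyte_to_unicode_spec : Claim_equal_generate_ccode_map_singlebyte_to_unicode := by
  intro m2u codecname area _
  unfold Spec_generate_ccode_map_singlebyte_to_unicode
  unfold generate_ccode_map_singlebyte_to_unicode generate_ccode_map_singlebyte_to_unicode_alt
  by_cases harea : (area == "g0") = true
  · simp only [harea, if_true]
    rw [buildStep_eq, foldl4_insert]
    exact main_eq _ _ _ (by rw [← widthEq]) _ _ 0 128 (by norm_num) (by norm_num)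
  · simp only [Bool.not_eq_true] at harea
    simp only [harea, Bool.false_eq_true, if_false]
    rw [buildStep_eq]
    exact main_eq _ _ _ (by rw [← widthEq]) _ _ 128 256 (by norm_num) (by norm_num)
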